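-- pv_equiv track=rewrite | github.com/chilly003/ssafy_Algo | algo/kakao_2023_tree/kdh.py | is_expressable
-- ===== SOURCE A (Python) =====
-- from collections import deque
-- from math import log2
--
-- def is_expressable(number: str) -> int:
--     filters = [3, 7, 15, 31, 63]
--     num_len = len(number)
--     threshold = 0
--
--     for i in range(5):
--         threshold = i
--         if num_len <= filters[i]:
--             break
--     number = ("0" * (filters[threshold] - num_len)) + number
--
--
--     filter = filters[threshold]
--     mid = filter // 2
--     if number[mid] == "0": return 0 # 루트가 0
--     else: # 루트가 1
--         bfs_q = deque()
--         bfs_q.append(mid)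
--         for h in range(int(log2(filter + 1)) - 1, 0, -1):
--             bfs_q_len = len(bfs_q)
--             for _ in range(bfs_q_len):
--                 mid = bfs_q.popleft() # mid 추출
--                 if mid - 2**(h-1) >= 0:  # 왼쪽 인덱싱 체크
--                     if number[mid] == '0' and number[mid-2**(h-1)] == "1": # 내가 0인데 내 왼쪽 자식이 1이면
--                         return 0 # 즉시 중단
--                     else:# 내가 0이 아니거나, 내 왼쪽 자식이 0이라면
--                         bfs_q.append(mid - 2**(h-1))
--                 if mid + 2**(h-1) <= filter:  # 오른쪽 인덱싱 체크
--                     if number[mid] == '0' and number[mid+2**(h-1)] == "1": # 내가 0인데 내 오른쪽 자식이 1이면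
--                         return 0 # 즉시 중단
--                     else: # 내가 0이 아니거나, 내 오른쪽 자식이 0이라면
--                         bfs_q.append(mid + 2**(h-1))
--         else: # 중단되지 않았다면? -> 검사 통과
--             return 1
-- ===== SOURCE B (Python) =====
-- from math import log2
--
-- def is_expressable(number: str) -> int:
--     filters = [3, 7, 15, 31, 63]
--     num_len = len(number)
--     threshold = 0
--     for i in range(5):
--         threshold = i
--         if num_len <= filters[i]:
--             break
--     number = ("0" * (filters[threshold] - num_len)) + number
--     filter = filters[threshold]
--     mid = filter // 2
--     if number[mid] == "0":
--         return 0
--     return _valid(number, mid, int(log2(filter + 1)) - 1)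
--
-- def _valid(s, idx, h):
--     # DFS over the complete tree: children of idx at height h sit at idx +/- 2**(h-1)
--     if h == 0:
--         return 1
--     d = 2 ** (h - 1)
--     for c in (idx - d, idx + d):
--         if s[idx] == '0' and s[c] == '1':
--             return 0
--         if not _valid(s, c, h - 1):
--             return 0
--     return 1
-- ===== Notes on version B (the rewrite author's own statement) =====
-- stated objective: alternative
-- what changed: The level-order BFS with a deque over tree indices is replaced by a direct DFS recursion valid(idx,h) over the tree structure (the padding/threshold prelude is kept identical).
import Mathlib
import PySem

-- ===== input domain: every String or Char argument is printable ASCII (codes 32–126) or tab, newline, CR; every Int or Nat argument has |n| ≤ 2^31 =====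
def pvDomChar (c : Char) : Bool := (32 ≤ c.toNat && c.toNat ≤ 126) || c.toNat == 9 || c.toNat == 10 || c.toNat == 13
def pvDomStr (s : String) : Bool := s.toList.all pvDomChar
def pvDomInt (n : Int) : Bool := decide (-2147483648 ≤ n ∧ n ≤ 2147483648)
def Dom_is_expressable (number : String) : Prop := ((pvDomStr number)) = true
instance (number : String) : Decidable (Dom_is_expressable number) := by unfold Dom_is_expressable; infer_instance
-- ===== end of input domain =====

-- B replaces A's level-order BFS (deque of indices) by a DFS recursion over the tree
-- structure; the threshold/padding prelude is unchanged. Objective: alternative.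

-- ===== PORT A =====

-- char at Int index; indices occurring in A are proved in range, the default is unreachable
def charAtA (s : List Char) (i : Int) : Char := (PySem.List.pyGet? s i).getD ' '

-- the 'for i in range(5): threshold = i; if num_len <= filters[i]: break' loop
def threshA (numLen : Int) : List Int → Nat → Nat → Nat
  | [], _, t => t
  | f :: rest, i, _ => if numLen ≤ f then i else threshA numLen rest (i + 1) i

-- one pass of the inner 'for _ in range(bfs_q_len)' loop over the queue at python height h;
-- none = the early 'return 0' fired, some q' = the queue for the next level
def levelA (s : List Char) (filter : Int) (h : Nat) : List Int → List Int → Option (List Int)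
  | [], acc => some acc
  | mid :: rest, acc =>
      let d : Int := (2 : Int) ^ (h - 1)
      if mid - d ≥ 0 then
        if charAtA s mid = '0' ∧ charAtA s (mid - d) = '1' then none
        else
          if mid + d ≤ filter then
            if charAtA s mid = '0' ∧ charAtA s (mid + d) = '1' then none
            else levelA s filter h rest (acc ++ [mid - d] ++ [mid + d])
          else levelA s filter h rest (acc ++ [mid - d])
      else
        if mid + d ≤ filter then
          if charAtA s mid = '0' ∧ charAtA s (mid + d) = '1' then none
          else levelA s filter h rest (acc ++ [mid + d])
        else levelA s filter h rest acc

-- the outer 'for h in range(int(log2(filter+1))-1, 0, -1)' loop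
def bfsA (s : List Char) (filter : Int) : Nat → List Int → Int
  | 0, _ => 1
  | h + 1, q =>
      match levelA s filter (h + 1) q [] with
      | none => 0
      | some q' => bfsA s filter h q'

def is_expressable (number : String) : Int :=
  let filters : List Int := [3, 7, 15, 31, 63]
  let numLen : Int := (number.length : Int)
  let t : Nat := threshA numLen filters 0 0
  let f : Int := filters.getD t 0
  -- "0" * (filters[threshold] - num_len) + number  ('0'*k is "" for k ≤ 0, as .toNat gives)
  let s : List Char := List.replicate (f - numLen).toNat '0' ++ number.toList
  let mid : Int := PySem.Int.floordiv f 2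
  if charAtA s mid = '0' then 0
  -- int(log2(filter+1)) - 1 : filter+1 is an exact power of two (4..64), so float log2
  -- is exact and equals Nat.log2
  else bfsA s f (Nat.log2 (f + 1).toNat - 1) [mid]

-- ===== PORT B =====

def charAtB (s : List Char) (i : Int) : Char := (PySem.List.pyGet? s i).getD ' '

def threshB (numLen : Int) : List Int → Nat → Nat → Nat
  | [], _, t => t
  | f :: rest, i, _ => if numLen ≤ f then i else threshB numLen rest (i + 1) i

-- _valid(s, idx, h): DFS; the python 'for c in (idx-d, idx+d)' two-element loop is unrolled;
-- 'if not _valid(...)' tests = 0 since _valid only returns 0 or 1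
def validB (s : List Char) (idx : Int) : Nat → Int
  | 0 => 1
  | h + 1 =>
      let d : Int := (2 : Int) ^ h
      if charAtB s idx = '0' ∧ charAtB s (idx - d) = '1' then 0
      else if validB s (idx - d) h = 0 then 0
      else if charAtB s idx = '0' ∧ charAtB s (idx + d) = '1' then 0
      else if validB s (idx + d) h = 0 then 0
      else 1

def is_expressable_alt (number : String) : Int :=
  let filters : List Int := [3, 7, 15, 31, 63]
  let numLen : Int := (number.length : Int)
  let t : Nat := threshB numLen filters 0 0
  let f : Int := filters.getD t 0
  let s : List Char := List.replicate (f - numLen).toNat '0' ++ number.toList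
  let mid : Int := PySem.Int.floordiv f 2
  if charAtB s mid = '0' then 0
  else validB s mid (Nat.log2 (f + 1).toNat - 1)

-- ===== PRECONDITION & SPEC =====
def Spec_is_expressable (number : String) (out : Int) : Prop := out = is_expressable_alt number
instance (number : String) (out : Int) : Decidable (Spec_is_expressable number out) := by unfold Spec_is_expressable; infer_instance

-- ===== CLAIM (what is proved, stated in full; the proofs are below) =====
def Claim_equal_is_expressable : Prop := ∀ (number : String), Dom_is_expressable number → Spec_is_expressable number (is_expressable number)

-- ===== LEMMAS AND PROOFS =====

theorem charAtB_eq : charAtB = charAtA := rfl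
theorem threshB_eq (numLen : Int) (l : List Int) (i t : Nat) :
    threshB numLen l i t = threshA numLen l i t := by
  induction l generalizing i t with
  | nil => rfl
  | cons f rest ih => simp only [threshB, threshA, ih]

-- validB only returns 0 or 1
theorem validB_zero_or_one (s : List Char) (idx : Int) (h : Nat) :
    validB s idx h = 0 ∨ validB s idx h = 1 := by
  cases h with
  | zero => right; rfl
  | succ h => simp only [validB]; split_ifs <;> simp

-- unfolding of validB at a successor height
theorem validB_succ (s : List Char) (idx : Int) (h : Nat) :
    validB s idx (h + 1) = 1 ↔
      ¬(charAtA s idx = '0' ∧ charAtA s (idx - 2 ^ h) = '1') ∧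
      ¬(charAtA s idx = '0' ∧ charAtA s (idx + 2 ^ h) = '1') ∧
      validB s (idx - 2 ^ h) h = 1 ∧ validB s (idx + 2 ^ h) h = 1 := by
  simp only [validB, charAtB_eq]
  rcases validB_zero_or_one s (idx - 2 ^ h) h with e1 | e1 <;>
    rcases validB_zero_or_one s (idx + 2 ^ h) h with e2 | e2 <;>
      split_ifs <;> simp_all

-- characterization of one BFS level, given per-element bounds
theorem levelA_char (s : List Char) (f : Int) (h : Nat) (q : List Int) (acc : List Int)
    (hb : ∀ i ∈ q, 2 ^ (h + 1) - 1 ≤ i ∧ i ≤ f - 2 ^ (h + 1)) :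
    levelA s f (h + 1) q acc =
      if ∀ i ∈ q, ¬(charAtA s i = '0' ∧ charAtA s (i - 2 ^ h) = '1') ∧
                  ¬(charAtA s i = '0' ∧ charAtA s (i + 2 ^ h) = '1')
      then some (acc ++ q.flatMap (fun i => [i - 2 ^ h, i + 2 ^ h]))
      else none := by
  induction q generalizing acc with
  | nil => simp [levelA]
  | cons mid rest ih =>
      obtain ⟨h1, h2⟩ := hb mid (by simp)
      have hd : ((2 : Int) ^ (h + 1 - 1)) = 2 ^ h := by norm_num
      have hpow : (0 : Int) < 2 ^ h := by positivity
      have hpow2 : (2 : Int) ^ (h + 1) = 2 ^ h + 2 ^ h := by ring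
      have hL : mid - (2 : Int) ^ h ≥ 0 := by omega
      have hR : mid + (2 : Int) ^ h ≤ f := by omega
      simp only [levelA, hd, if_pos hL, if_pos hR]
      by_cases c1 : charAtA s mid = '0' ∧ charAtA s (mid - 2 ^ h) = '1'
      · simp [c1]
      · by_cases c2 : charAtA s mid = '0' ∧ charAtA s (mid + 2 ^ h) = '1'
        · simp [c2]
        · rw [if_neg c1, if_neg c2,
            ih (acc ++ [mid - 2 ^ h] ++ [mid + 2 ^ h]) (fun i hi => hb i (by simp [hi]))]
          by_cases call : ∀ i ∈ rest,
              ¬(charAtA s i = '0' ∧ charAtA s (i - 2 ^ h) = '1') ∧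
              ¬(charAtA s i = '0' ∧ charAtA s (i + 2 ^ h) = '1')
          · rw [if_pos call, if_pos (List.forall_mem_cons.mpr ⟨⟨c1, c2⟩, call⟩)]
            simp [List.flatMap_cons]
          · rw [if_neg call, if_neg (by
              rw [List.forall_mem_cons]; rintro ⟨-, hrest⟩; exact call hrest)]

-- main lemma: the BFS from height h over a queue equals the conjunction of DFS checks
theorem bfs_eq_valid (s : List Char) (f : Int) (h : Nat) (q : List Int)
    (hb : ∀ i ∈ q, 2 ^ h - 1 ≤ i ∧ i ≤ f - 2 ^ h) :
    bfsA s f h q = if ∀ i ∈ q, validB s i h = 1 then 1 else 0 := by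
  induction h generalizing q with
  | zero => simp [bfsA, validB]
  | succ h ih =>
      rw [bfsA, levelA_char s f h q [] hb]
      by_cases ok : ∀ i ∈ q, ¬(charAtA s i = '0' ∧ charAtA s (i - 2 ^ h) = '1') ∧
                             ¬(charAtA s i = '0' ∧ charAtA s (i + 2 ^ h) = '1')
      · rw [if_pos ok]
        have hpow : (0 : Int) < 2 ^ h := by positivity
        have hpow2 : (2 : Int) ^ (h + 1) = 2 ^ h + 2 ^ h := by ring
        have hbc : ∀ j ∈ q.flatMap (fun i => [i - 2 ^ h, i + 2 ^ h]),
            2 ^ h - 1 ≤ j ∧ j ≤ f - 2 ^ h := by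
          intro j hj
          simp only [List.mem_flatMap, List.mem_cons] at hj
          obtain ⟨i, hi, hj⟩ := hj
          obtain ⟨b1, b2⟩ := hb i hi
          rcases hj with rfl | rfl | hfalse
          · omega
          · omega
          · exact absurd hfalse (List.not_mem_nil)
        show bfsA s f h ([] ++ q.flatMap (fun i => [i - 2 ^ h, i + 2 ^ h])) = _
        rw [List.nil_append, ih _ hbc]
        congr 1
        simp only [eq_iff_iff]
        constructor
        · intro hall i hi
          obtain ⟨c1, c2⟩ := ok i hi
          refine (validB_succ s i h).mpr ⟨c1, c2, ?_, ?_⟩ <;>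
            exact hall _ (List.mem_flatMap.mpr ⟨i, hi, by simp⟩)
        · intro hall j hj
          simp only [List.mem_flatMap, List.mem_cons] at hj
          obtain ⟨i, hi, hj⟩ := hj
          have hv := (validB_succ s i h).mp (hall i hi)
          rcases hj with rfl | rfl | hfalse
          · exact hv.2.2.1
          · exact hv.2.2.2
          · exact absurd hfalse (List.not_mem_nil)
      · rw [if_neg ok]
        show (0 : Int) = _
        rw [if_neg]
        intro hall
        exact ok fun i hi =>
          ⟨((validB_succ s i h).mp (hall i hi)).1, ((validB_succ s i h).mp (hall i hi)).2.1⟩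

-- per-threshold instantiation: root bounds at each concrete filter value
theorem bfs_root (s : List Char) (f : Int) (t : Nat) (hf : f = 2 ^ (t + 2) - 1) :
    bfsA s f (t + 1) [PySem.Int.floordiv f 2] =
      validB s (PySem.Int.floordiv f 2) (t + 1) := by
  have hpow : (0 : Int) < 2 ^ t := by positivity
  have hpow4 : (2 : Int) ^ (t + 2) = 4 * 2 ^ t := by ring
  have hpow2 : (2 : Int) ^ (t + 1) = 2 * 2 ^ t := by ring
  have hmid : PySem.Int.floordiv f 2 = 2 ^ (t + 1) - 1 := by
    rw [PySem.Int.floordiv_eq_ediv_of_pos (by norm_num)]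
    omega
  rw [bfs_eq_valid s f (t + 1) [PySem.Int.floordiv f 2] (by
    intro i hi
    simp only [List.mem_singleton] at hi
    subst hi
    rw [hmid]
    omega)]
  rcases validB_zero_or_one s (PySem.Int.floordiv f 2) (t + 1) with e | e <;>
    simp only [List.mem_singleton, forall_eq, e] <;> norm_num

-- ===== VERDICT (by name: the statement is the Claim_ definition above) =====
theorem is_expressable_spec : Claim_equal_is_expressable := by
  intro number _
  unfold Spec_is_expressable is_expressable is_expressable_alt
  simp only [charAtB_eq, threshB_eq]
  set numLen : Int := (number.length : Int) with hn
  have hthresh : threshA numLen [3, 7, 15, 31, 63] 0 0 = 0 ∨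
      threshA numLen [3, 7, 15, 31, 63] 0 0 = 1 ∨
      threshA numLen [3, 7, 15, 31, 63] 0 0 = 2 ∨
      threshA numLen [3, 7, 15, 31, 63] 0 0 = 3 ∨
      threshA numLen [3, 7, 15, 31, 63] 0 0 = 4 := by
    simp only [threshA]
    split_ifs <;> simp
  rcases hthresh with ht | ht | ht | ht | ht <;> rw [ht] <;>
    simp only [List.getD, List.getElem?_cons_zero, List.getElem?_cons_succ, Option.getD_some] <;>
    split_ifs with hroot <;> first
      | rfl
      | (exact bfs_root _ _ _ (by norm_num))
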